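-- pv_equiv track=rewrite | github.com/krisztinahorvath/UBB-Computer-Science | Semester 1/Fundamentals of Programming/Labs/a4-913-Horvath-Krisztina/src/functions.py | reformat_user_cmd
-- ===== SOURCE A (Python) =====
-- def reformat_user_cmd(user_cmd):
--     """
--     Reformats the input given by the user (deletes all extra spaces, leaving only one space between each word/number)
--     :param user_cmd: input command by user
--     :return:
--     """
--     user_cmd = user_cmd.strip()
--     user_cmd = user_cmd.lower()
--     new = ""
--     for i in range(0, len(user_cmd)):
--         if user_cmd[i] != ' ':
--             new += user_cmd[i]
--         elif new[len(new) - 1] != ' ':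
--             new += ' '
--     return new
-- ===== SOURCE B (Python) =====
-- def reformat_user_cmd(user_cmd):
--     """Collapse runs of spaces to a single space after strip+lower (tabs/newlines inside are kept)."""
--     fragments = user_cmd.strip().lower().split(' ')
--     return ' '.join(f for f in fragments if f)
-- ===== Notes on version B (the rewrite author's own statement) =====
-- stated objective: idiomatic
-- what changed: Replaced A's character-by-character stateful collapse loop (which inspects the last character built so far) with a tokenize-filter-rejoin: split on the literal single space, drop the empty fragments produced by space runs, and join with one space.
import Mathlib
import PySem

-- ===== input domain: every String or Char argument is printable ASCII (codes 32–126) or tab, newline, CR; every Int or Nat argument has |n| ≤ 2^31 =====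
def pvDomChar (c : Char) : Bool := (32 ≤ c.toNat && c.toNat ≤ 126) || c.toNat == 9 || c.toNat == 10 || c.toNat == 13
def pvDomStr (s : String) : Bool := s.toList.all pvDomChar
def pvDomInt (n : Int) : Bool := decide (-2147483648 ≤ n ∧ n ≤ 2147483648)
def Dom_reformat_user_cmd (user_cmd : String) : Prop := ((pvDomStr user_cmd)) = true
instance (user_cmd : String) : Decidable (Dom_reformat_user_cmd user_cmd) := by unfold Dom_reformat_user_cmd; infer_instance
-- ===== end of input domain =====

-- B replaces A's stateful character-by-character space collapse with split(' ')/filter/join; equal return values proved.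

-- ===== PORT A =====
-- A's loop body: if c != ' ': new += c; elif new[len(new)-1] != ' ': new += ' '.
-- new[len(new)-1] is read with pyGet? (none on empty new, where Python would raise IndexError;
-- that state is unreachable because the string is stripped first, so leading spaces are gone).
def pvAStep (new : List Char) (c : Char) : List Char :=
  if c ≠ ' ' then new ++ [c]
  else if PySem.List.pyGet? new ((new.length : Int) - 1) ≠ some ' ' then new ++ [' '] else new

def reformat_user_cmd (user_cmd : String) : String :=
  String.ofList ((PySem.Chars.lower (PySem.Chars.strip user_cmd.toList)).foldl pvAStep [])

-- ===== PORT B =====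
def reformat_user_cmd_alt (user_cmd : String) : String :=
  let fragments := PySem.Chars.splitOn (PySem.Chars.lower (PySem.Chars.strip user_cmd.toList)) [' ']
  String.ofList (PySem.Chars.join [' '] (fragments.filter (· ≠ [])))

-- ===== PRECONDITION & SPEC =====
def Spec_reformat_user_cmd (user_cmd : String) (out : String) : Prop := out = reformat_user_cmd_alt user_cmd
instance (user_cmd : String) (out : String) : Decidable (Spec_reformat_user_cmd user_cmd out) := by unfold Spec_reformat_user_cmd; infer_instance

-- ===== CLAIM (what is proved, stated in full; the proofs are below) =====
def Claim_equal_reformat_user_cmd : Prop := ∀ (user_cmd : String), Dom_reformat_user_cmd user_cmd → Spec_reformat_user_cmd user_cmd (reformat_user_cmd user_cmd)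

-- ===== LEMMAS AND PROOFS =====

-- what str.split(' ') computes, as a plain structural recursion (pre = current fragment)
def pvSplit (pre : List Char) : List Char → List (List Char)
  | [] => [pre]
  | c :: t => if c = ' ' then pre :: pvSplit [] t else pvSplit (pre ++ [c]) t

-- the collapsed remainder of the string, given only whether the previous kept char was a space
def pvRun (b : Bool) : List Char → List Char
  | [] => []
  | c :: t => if c ≠ ' ' then c :: pvRun false t else if b then pvRun true t else ' ' :: pvRun true t

theorem pvSplit_cons_space (pre t) : pvSplit pre (' ' :: t) = pre :: pvSplit [] t := by
  simp [pvSplit]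

theorem pvSplit_cons_char (pre c t) (hc : c ≠ ' ') : pvSplit pre (c :: t) = pvSplit (pre ++ [c]) t := by
  simp [pvSplit, hc]

theorem pvPyGet_last (new : List Char) :
    PySem.List.pyGet? new ((new.length : Int) - 1) = new.getLast? := by
  cases new with
  | nil => simp [PySem.List.pyGet?]
  | cons a l =>
    have h : ((a :: l).length : Int) - 1 = ((l.length : Nat) : Int) := by
      simp
    rw [h, PySem.List.pyGet?_natCast, List.getLast?_eq_getElem?]
    simp

theorem pvFoldA (s : List Char) : ∀ (acc : List Char),
    s.foldl pvAStep acc = acc ++ pvRun (acc.getLast? == some ' ') s := by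
  induction s with
  | nil => simp [pvRun]
  | cons c t ih =>
    intro acc
    by_cases hc : c = ' '
    · subst hc
      by_cases hl : acc.getLast? = some ' '
      · have hstep : pvAStep acc ' ' = acc := by
          simp [pvAStep, pvPyGet_last, hl]
        simp [List.foldl_cons, hstep, ih, pvRun, hl]
      · have hstep : pvAStep acc ' ' = acc ++ [' '] := by
          simp [pvAStep, pvPyGet_last, hl]
        have hl2 : (acc ++ [' ']).getLast? = some ' ' := by simp
        simp [List.foldl_cons, hstep, ih, hl2, pvRun, hl]
    · have hstep : pvAStep acc c = acc ++ [c] := by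
        simp [pvAStep, hc]
      have hl2 : (acc ++ [c]).getLast? = some c := by simp
      have hb : (c == ' ') = false := by simp [hc]
      simp [List.foldl_cons, hstep, ih, hl2, pvRun, hb]
      intro h
      exact absurd h hc

theorem pvGo (fuel : Nat) : ∀ (s cur : List Char) (acc : List (List Char)), s.length ≤ fuel →
    PySem.Chars.splitOn.go [' '] fuel s cur acc = acc.reverse ++ pvSplit cur.reverse s := by
  induction fuel with
  | zero =>
    intro s cur acc hs
    have : s = [] := List.eq_nil_of_length_eq_zero (by omega)
    subst this
    simp [PySem.Chars.splitOn.go, pvSplit]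
  | succ fuel ih =>
    intro s cur acc hs
    cases s with
    | nil => simp [PySem.Chars.splitOn.go, pvSplit]
    | cons c rest =>
      by_cases hc : c = ' '
      · subst hc
        have hpre : [' '].isPrefixOf (' ' :: rest) = true := by simp [List.isPrefixOf]
        rw [PySem.Chars.splitOn.go, if_pos hpre]
        simp only [List.length_cons] at hs
        simp only [List.length_singleton, List.drop_one, List.tail_cons]
        rw [ih rest [] (cur.reverse :: acc) (by omega)]
        simp [pvSplit]
      · have hpre : [' '].isPrefixOf (c :: rest) = false := by
          simp [List.isPrefixOf]
          exact fun h => (hc h.symm).elim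
        rw [PySem.Chars.splitOn.go, if_neg (by simp [hpre])]
        simp only [List.length_cons] at hs
        rw [ih rest (c :: cur) acc (by omega)]
        simp [pvSplit, hc]

theorem pvSplitOn_eq (s : List Char) : PySem.Chars.splitOn s [' '] = pvSplit [] s := by
  rw [PySem.Chars.splitOn, pvGo (s.length + 1) s [] [] (by omega)]
  rfl

theorem pvRun_eq_nil (t : List Char) : ∀ b, pvRun b t = [] → ∀ c ∈ t, c = ' ' := by
  induction t with
  | nil => simp
  | cons c t ih =>
    intro b h
    by_cases hc : c = ' '
    · subst hc
      have hne : ¬(' ' ≠ ' ') := by decide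
      simp only [pvRun, if_neg hne] at h
      by_cases hb : b
      · rw [if_pos hb] at h
        intro x hx
        rcases List.mem_cons.mp hx with h1 | h1
        · exact h1
        · exact ih true h x h1
      · rw [if_neg hb] at h
        simp at h
    · simp [pvRun, hc] at h

theorem pvJoin : ∀ (s : List Char), s.getLast? ≠ some ' ' →
    PySem.Chars.join [' '] ((pvSplit [] s).filter (· ≠ [])) = pvRun true s ∧
    ∀ pre, pre ≠ [] →
      PySem.Chars.join [' '] ((pvSplit pre s).filter (· ≠ [])) = pre ++ pvRun false s := by
  intro s
  induction s with
  | nil =>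
    intro _
    constructor
    · simp [pvSplit, pvRun, PySem.Chars.join_nil]
    · intro pre hpre
      simp [pvSplit, pvRun, hpre, PySem.Chars.join_singleton]
  | cons c t ih =>
    intro hl
    by_cases hc : c = ' '
    · subst hc
      have htne : t ≠ [] := by
        intro h0; subst h0; simp at hl
      have ht : t.getLast? ≠ some ' ' := by
        cases t with
        | nil => simp
        | cons b l => rwa [List.getLast?_cons_cons] at hl
      have ihi := (ih ht).1
      have hF : (pvSplit [] t).filter (· ≠ []) ≠ [] := by
        intro h0
        rw [h0, PySem.Chars.join_nil] at ihi
        obtain ⟨x, hx⟩ := Option.isSome_iff_exists.mp (List.getLast?_isSome.mpr htne)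
        have hxmem : x ∈ t := List.mem_of_getLast? hx
        have := pvRun_eq_nil t true ihi.symm x hxmem
        rw [this] at hx
        exact ht hx
      constructor
      · rw [pvSplit_cons_space]
        have : (([] : List Char) :: pvSplit [] t).filter (· ≠ []) = (pvSplit [] t).filter (· ≠ []) := by
          simp
        rw [this, ihi]
        simp [pvRun]
      · intro pre hpre
        rw [pvSplit_cons_space]
        have hfil : ((pre : List Char) :: pvSplit [] t).filter (· ≠ []) = pre :: (pvSplit [] t).filter (· ≠ []) := by
          simp [hpre]
        rw [hfil]
        obtain ⟨f0, F', hF'⟩ := List.exists_cons_of_ne_nil hF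
        rw [hF', PySem.Chars.join_cons_cons, ← hF', ihi]
        simp [pvRun]
    · have ht : t.getLast? ≠ some ' ' := by
        cases t with
        | nil => simp
        | cons b l => rwa [List.getLast?_cons_cons] at hl
      have ihii := (ih ht).2
      constructor
      · rw [show pvSplit [] (c :: t) = pvSplit ([] ++ [c]) t from pvSplit_cons_char [] c t hc]
        have h1 := ihii [c] (by simp)
        simp only [List.nil_append]
        rw [h1]
        simp [pvRun, hc]
      · intro pre hpre
        rw [pvSplit_cons_char pre c t hc]
        have h1 := ihii (pre ++ [c]) (by simp)
        rw [h1]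
        simp [pvRun, hc]

theorem pvRun_head (s : List Char) (h : s.head? ≠ some ' ') : pvRun false s = pvRun true s := by
  cases s with
  | nil => rfl
  | cons c t =>
    have hc : c ≠ ' ' := by
      intro hc; exact h (by simp [hc])
    simp [pvRun, hc]

theorem pvLowerChar_ne_space (x : Char) (h : PySem.Chars.isspace x = false) :
    PySem.Chars.lowerChar x ≠ ' ' := by
  by_cases hu : PySem.Chars.isupper x = true
  · have hb : 65 ≤ x.toNat ∧ x.toNat ≤ 90 := by
      simp [PySem.Chars.isupper, Char.le_def] at hu
      exact ⟨hu.1, hu.2⟩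
    simp only [PySem.Chars.lowerChar, hu, if_true]
    intro hc
    have h32 : (' ').toNat = 32 := by decide
    have := congrArg Char.toNat hc
    rw [Char.toNat_ofNat, if_pos (Or.inl (by omega)), h32] at this
    omega
  · simp only [PySem.Chars.lowerChar, hu]
    intro hc
    subst hc
    simp [PySem.Chars.isspace] at h

theorem pvHead_dropWhile (p : Char → Bool) (l : List Char) (x : Char)
    (h : (l.dropWhile p).head? = some x) : p x = false := by
  induction l with
  | nil => simp at h
  | cons a l ih =>
    by_cases ha : p a = true
    · rw [List.dropWhile_cons_of_pos ha] at h
      exact ih h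
    · rw [List.dropWhile_cons_of_neg ha] at h
      simp at h
      subst h
      simpa using ha

theorem pvRstrip_prefix (l : List Char) : PySem.Chars.rstrip l <+: l := by
  have h := List.dropWhile_suffix (l := l.reverse) PySem.Chars.isspace
  have h2 := List.reverse_prefix.mpr h
  rwa [List.reverse_reverse] at h2

theorem pvStrip_head (cs : List Char) (x : Char)
    (h : (PySem.Chars.strip cs).head? = some x) : PySem.Chars.isspace x = false := by
  unfold PySem.Chars.strip at h
  obtain ⟨u, hu⟩ := pvRstrip_prefix (PySem.Chars.lstrip cs)
  have hh : (PySem.Chars.lstrip cs).head? = some x := by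
    rw [← hu, List.head?_append, h]
    rfl
  exact pvHead_dropWhile PySem.Chars.isspace cs x hh

theorem pvStrip_last (cs : List Char) (x : Char)
    (h : (PySem.Chars.strip cs).getLast? = some x) : PySem.Chars.isspace x = false := by
  unfold PySem.Chars.strip PySem.Chars.rstrip at h
  rw [List.getLast?_reverse] at h
  exact pvHead_dropWhile PySem.Chars.isspace _ x h

-- ===== VERDICT (by name: the statement is the Claim_ definition above) =====
theorem reformat_user_cmd_spec : Claim_equal_reformat_user_cmd := by
  intro user_cmd _
  unfold Spec_reformat_user_cmd reformat_user_cmd reformat_user_cmd_alt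
  set t := PySem.Chars.lower (PySem.Chars.strip user_cmd.toList) with ht
  have hlast : t.getLast? ≠ some ' ' := by
    intro hc
    rw [ht, PySem.Chars.lower, List.getLast?_map] at hc
    cases hs : (PySem.Chars.strip user_cmd.toList).getLast? with
    | none => rw [hs] at hc; simp at hc
    | some x =>
      rw [hs] at hc
      simp only [Option.map_some, Option.some.injEq] at hc
      exact pvLowerChar_ne_space x (pvStrip_last user_cmd.toList x hs) hc
  have hhead : t.head? ≠ some ' ' := by
    intro hc
    rw [ht, PySem.Chars.lower, List.head?_map] at hc
    cases hs : (PySem.Chars.strip user_cmd.toList).head? with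
    | none => rw [hs] at hc; simp at hc
    | some x =>
      rw [hs] at hc
      simp only [Option.map_some, Option.some.injEq] at hc
      exact pvLowerChar_ne_space x (pvStrip_head user_cmd.toList x hs) hc
  have hA : t.foldl pvAStep [] = pvRun false t := by
    simpa using pvFoldA t []
  have hB : PySem.Chars.join [' '] ((PySem.Chars.splitOn t [' ']).filter (· ≠ [])) = pvRun true t := by
    rw [pvSplitOn_eq]
    exact (pvJoin t hlast).1
  simp only [hA, hB]
  rw [pvRun_head t hhead]
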